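-- pv_equiv track=rewrite | github.com/caffreydev/adventofcode2023 | day13/mirrorsummer.py | patternPointsCols
-- ===== SOURCE A (Python) =====
-- def patternPointsCols(pattern):
--     cols = []
--     maximum = 0
--     for i in range(len(pattern[0])):
--         col = []
--         for j in range(len(pattern)):
--             col.append(pattern[j][i])
--         cols.append(col)
--         for i in range (len(cols) - 1):
--             if cols[i] != cols[i + 1]:
--                 continue
--             if len(cols)/2 >= i + 1:
--                 mirror = True
--                 for j in range (i):
--                     if (cols[i - 1 - j] != cols[i + j + 1]):
--                         mirror = False
--                         break
--                 if mirror: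
--                     maximum = max(maximum, i + 1)
--             else:
--                 mirror = True
--                 for j in range (len(cols) - i - 2):
--                     if (cols[i - 1 - j] != cols[i + j + 2]):
--                         mirror = False
--                         break
--                 if mirror:
--                     maximum = max(i + 1, maximum)
--
--     return maximum
-- ===== SOURCE B (Python) =====
-- def patternPointsCols(pattern):
--     # Transpose once; the answer is the largest i with column i equal to
--     # column i+1, plus 1 (0 if none).
--     cols = list(zip(*pattern))
--     best = 0
--     for i in range(len(cols) - 1):
--         if cols[i] == cols[i + 1]:
--             best = i + 1
--     return best
-- ===== Notes on version B (the rewrite author's own statement) =====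
-- stated objective: simpler
-- what changed: A rebuilds the column list incrementally and after every new column rescans all adjacent pairs running a full mirror-extension check; B transposes once with zip and makes a single pass recording the last adjacent equal column pair, which provably yields the same maximum.
import Mathlib
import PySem

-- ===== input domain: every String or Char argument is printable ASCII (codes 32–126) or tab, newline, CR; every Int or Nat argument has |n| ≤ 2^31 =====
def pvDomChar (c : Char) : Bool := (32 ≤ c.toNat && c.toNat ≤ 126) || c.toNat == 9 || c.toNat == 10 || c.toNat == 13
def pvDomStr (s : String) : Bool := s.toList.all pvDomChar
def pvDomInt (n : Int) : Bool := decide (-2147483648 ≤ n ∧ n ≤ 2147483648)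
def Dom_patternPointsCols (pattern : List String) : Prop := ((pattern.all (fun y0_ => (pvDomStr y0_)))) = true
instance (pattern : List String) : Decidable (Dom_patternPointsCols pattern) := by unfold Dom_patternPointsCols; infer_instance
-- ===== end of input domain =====

-- B transposes once and records the last adjacent equal column pair in one pass,
-- replacing A's per-column rescan of all pairs with full mirror-extension checks.

-- ===== PORT A =====
-- the inner `for j ...: col.append(pattern[j][i])` loop
def pvColA (pattern : List String) (i : Nat) : List Char :=
  (List.range pattern.length).foldl
    (fun col j => col ++ [(pattern.getD j "").toList.getD i ' ']) []

-- body of the `for i in range(len(cols) - 1)` rescan; `len(cols)/2 >= i+1`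
-- (Python float division) is exactly `2*(i+1) ≤ len(cols)` over the integers
def pvInnerBody (cols : List (List Char)) (m : Int) (i2 : Nat) : Int :=
  if cols.getD i2 [] ≠ cols.getD (i2 + 1) [] then m
  else if 2 * (i2 + 1) ≤ cols.length then
    if (List.range i2).all
        (fun j => cols.getD (i2 - 1 - j) [] == cols.getD (i2 + j + 1) []) then
      max m ((i2 : Int) + 1)
    else m
  else
    if (List.range (cols.length - i2 - 2)).all
        (fun j => cols.getD (i2 - 1 - j) [] == cols.getD (i2 + j + 2) []) then
      max ((i2 : Int) + 1) m
    else m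

-- one iteration of the outer `for i in range(len(pattern[0]))` loop
def pvStepA (pattern : List String) (st : List (List Char) × Int) (i : Nat) :
    List (List Char) × Int :=
  let cols := st.1 ++ [pvColA pattern i]
  (cols, (List.range (cols.length - 1)).foldl (pvInnerBody cols) st.2)

def patternPointsCols (pattern : List String) : Int :=
  ((List.range (pattern.headD "").toList.length).foldl (pvStepA pattern) ([], 0)).2

-- ===== PORT B =====
-- list(zip(*pattern)): truncates every row to the shortest; zip() of nothing is []
def pvZipCols (pattern : List String) : List (List Char) :=
  match pattern with
  | [] => []
  | _ :: _ =>
    let m := (pattern.map (fun r => r.toList.length)).min?.getD 0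
    (List.range m).map (fun i => pattern.map (fun r => r.toList.getD i ' '))

def patternPointsCols_alt (pattern : List String) : Int :=
  let cols := pvZipCols pattern
  (List.range (cols.length - 1)).foldl
    (fun best i => if cols.getD i [] == cols.getD (i + 1) [] then ((i : Int) + 1) else best) 0

-- ===== PRECONDITION & SPEC =====
-- Pre_ excludes exactly the inputs where A raises IndexError: the empty pattern
-- (pattern[0]) and patterns with a row shorter than the first (pattern[j][i]).
def Pre_patternPointsCols (pattern : List String) : Prop :=
  pattern ≠ [] ∧ ∀ r ∈ pattern, (pattern.headD "").toList.length ≤ r.toList.length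
instance (pattern : List String) : Decidable (Pre_patternPointsCols pattern) := by
  unfold Pre_patternPointsCols; infer_instance
def pvWitness_patternPointsCols : List String := ["aba", "aba"]

def Spec_patternPointsCols (pattern : List String) (out : Int) : Prop :=
  out = patternPointsCols_alt pattern
instance (pattern : List String) (out : Int) : Decidable (Spec_patternPointsCols pattern out) := by
  unfold Spec_patternPointsCols; infer_instance

-- ===== CLAIM (what is proved, stated in full; the proofs are below) =====
def Claim_equal_patternPointsCols : Prop :=
  ∀ (pattern : List String), Dom_patternPointsCols pattern →
    Pre_patternPointsCols pattern →
    Spec_patternPointsCols pattern (patternPointsCols pattern)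

-- ===== LEMMAS AND PROOFS =====

-- the full transpose (what `cols` is when the outer loop finishes)
def pvT (pattern : List String) : List (List Char) :=
  (List.range (pattern.headD "").toList.length).map (pvColA pattern)

-- B's scan over the first t adjacent pairs of T
def pvBscan (T : List (List Char)) (t : Nat) : Int :=
  (List.range t).foldl
    (fun best i => if T.getD i [] == T.getD (i + 1) [] then ((i : Int) + 1) else best) 0

lemma pvColA_eq_map (pattern : List String) (i : Nat) :
    pvColA pattern i = pattern.map (fun r => r.toList.getD i ' ') := by
  unfold pvColA
  rw [PySem.List.foldl_append_singleton_eq_map]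
  rw [List.nil_append]
  apply List.ext_getElem
  · simp
  · intro j h1 h2
    have hr : j < pattern.length := by simpa using h1
    simp only [List.getElem_map, List.getElem_range, List.getD_eq_getElem _ _ hr]

lemma pvT_length (pattern : List String) :
    (pvT pattern).length = (pattern.headD "").toList.length := by
  simp [pvT]

lemma pvGetD_take {α : Type} (l : List α) (n i : Nat) (d : α) (h : i < n) :
    (l.take n).getD i d = l.getD i d := by
  simp [List.getD_eq_getElem?_getD, h]

lemma pvFoldl_fix {α β : Type} (f : β → α → β) (m : β) (l : List α)
    (h : ∀ x ∈ l, f m x = m) : l.foldl f m = m := by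
  induction l with
  | nil => rfl
  | cons a l ih =>
    simp only [List.mem_cons, forall_eq_or_imp] at h
    rw [List.foldl_cons, h.1]
    exact ih h.2

lemma pvZipCols_eq_pvT (pattern : List String) (h : Pre_patternPointsCols pattern) :
    pvZipCols pattern = pvT pattern := by
  obtain ⟨hne, hall⟩ := h
  cases pattern with
  | nil => exact absurd rfl hne
  | cons a t =>
    have hmin : (((a :: t).map (fun r => r.toList.length)).min?.getD 0) = a.toList.length := by
      have hfold : ((a :: t).map (fun r => r.toList.length)).min?.getD 0
          = (t.map (fun r => r.toList.length)).foldl min a.toList.length := by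
        simp [List.min?]
      rw [hfold, pvFoldl_fix]
      intro x hx
      simp only [List.mem_map] at hx
      obtain ⟨r, hr, rfl⟩ := hx
      have h1 := hall r (List.mem_cons_of_mem a hr)
      simp only [List.headD_cons] at h1
      exact min_eq_left h1
    show (List.range (((a :: t).map (fun r => r.toList.length)).min?.getD 0)).map
        (fun i => (a :: t).map (fun r => r.toList.getD i ' ')) = pvT (a :: t)
    rw [hmin]
    unfold pvT
    simp only [List.headD_cons]
    exact (List.map_congr_left (fun i _ => pvColA_eq_map (a :: t) i)).symm

lemma pvBscan_succ (T : List (List Char)) (t : Nat) :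
    pvBscan T (t + 1) =
      if T.getD t [] == T.getD (t + 1) [] then ((t : Int) + 1) else pvBscan T t := by
  unfold pvBscan
  rw [List.range_succ, List.foldl_append]
  simp

lemma pvBscan_le (T : List (List Char)) (t : Nat) : pvBscan T t ≤ (t : Int) := by
  induction t with
  | zero => simp [pvBscan]
  | succ t ih =>
    rw [pvBscan_succ]
    split_ifs
    · push_cast; omega
    · omega

lemma pvBscan_ge (T : List (List Char)) (t i : Nat) (hi : i < t)
    (he : T.getD i [] = T.getD (i + 1) []) : ((i : Int) + 1) ≤ pvBscan T t := by
  induction t with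
  | zero => omega
  | succ t ih =>
    rw [pvBscan_succ]
    by_cases hit : i = t
    · subst hit
      rw [if_pos (show (T.getD i [] == T.getD (i + 1) []) = true by simpa using he)]
    · have hi' : i < t := by omega
      split_ifs
      · push_cast; omega
      · exact ih hi'

lemma pvInnerBody_fix (C : List (List Char)) (m : Int) (i2 : Nat)
    (hle : C.getD i2 [] = C.getD (i2 + 1) [] → ((i2 : Int) + 1) ≤ m) :
    pvInnerBody C m i2 = m := by
  unfold pvInnerBody
  by_cases he : C.getD i2 [] = C.getD (i2 + 1) []
  · have h1 := hle he
    rw [if_neg (not_not_intro he)]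
    split_ifs <;> omega
  · rw [if_pos he]

lemma pvInner_step (C : List (List Char)) (k : Nat) (m : Int)
    (hL : C.length = k + 1) (hk : 1 ≤ k)
    (Hb : ∀ i2 : Nat, i2 < k - 1 → C.getD i2 [] = C.getD (i2 + 1) [] → ((i2 : Int) + 1) ≤ m)
    (Hm : m ≤ (k : Int)) :
    (List.range k).foldl (pvInnerBody C) m =
      if C.getD (k - 1) [] = C.getD k [] then (k : Int) else m := by
  have hrange : List.range k = List.range (k - 1) ++ [k - 1] := by
    conv_lhs => rw [show k = (k - 1) + 1 by omega]
    rw [List.range_succ]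
  rw [hrange, List.foldl_append,
      pvFoldl_fix _ m _ (fun i2 hi2 => pvInnerBody_fix C m i2 (Hb i2 (List.mem_range.mp hi2)))]
  simp only [List.foldl_cons, List.foldl_nil]
  have e1 : k - 1 + 1 = k := by omega
  have hc : ((k - 1 : Nat) : Int) + 1 = (k : Int) := by exact_mod_cast congrArg (Nat.cast (R := Int)) e1
  unfold pvInnerBody
  rw [e1, hL]
  by_cases he : C.getD (k - 1) [] = C.getD k []
  · rw [if_neg (not_not_intro he), if_pos he]
    rcases Nat.lt_or_ge k 2 with h2 | h2
    · have hk1 : k = 1 := by omega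
      subst hk1
      rw [if_pos (by omega : 2 * 1 ≤ 1 + 1)]
      rw [show (1 : Nat) - 1 = 0 from rfl]
      simp only [List.range_zero, List.all_nil, if_true]
      omega
    · have hgt : ¬ (2 * k ≤ k + 1) := by omega
      rw [if_neg hgt]
      have h0 : k + 1 - (k - 1) - 2 = 0 := by omega
      rw [h0]
      simp only [List.range_zero, List.all_nil, if_true]
      rw [hc]
      exact max_eq_left Hm
  · rw [if_pos he, if_neg he]

lemma pvMain (pattern : List String) (k : Nat)
    (hk : k ≤ (pattern.headD "").toList.length) :
    (List.range k).foldl (pvStepA pattern) ([], 0) =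
      ((pvT pattern).take k, pvBscan (pvT pattern) (k - 1)) := by
  induction k with
  | zero => simp [pvBscan]
  | succ k ih =>
    rw [List.range_succ, List.foldl_append, ih (by omega)]
    simp only [List.foldl_cons, List.foldl_nil]
    unfold pvStepA
    have hlen : k < (pvT pattern).length := by rw [pvT_length]; omega
    have htake : (pvT pattern).take k ++ [pvColA pattern k] = (pvT pattern).take (k + 1) := by
      rw [List.take_add_one, List.getElem?_eq_getElem hlen]
      simp [pvT]
    simp only [htake]
    have hlt : (((pvT pattern).take (k + 1)).length) = k + 1 := by
      rw [List.length_take]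
      omega
    rw [hlt]
    simp only [Nat.add_sub_cancel]
    rcases Nat.eq_zero_or_pos k with hk0 | hkpos
    · subst hk0
      simp [pvBscan]
    · have hstep := pvInner_step ((pvT pattern).take (k + 1)) k (pvBscan (pvT pattern) (k - 1))
        hlt hkpos
        (fun i2 hi2 he => by
          rw [pvGetD_take _ _ _ _ (by omega), pvGetD_take _ _ _ _ (by omega)] at he
          exact pvBscan_ge _ _ _ hi2 he)
        (le_trans (pvBscan_le _ _) (by exact_mod_cast Nat.sub_le k 1))
      rw [hstep]
      rw [pvGetD_take _ _ _ _ (by omega : k - 1 < k + 1), pvGetD_take _ _ _ _ (by omega : k < k + 1)]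
      have e1 : k - 1 + 1 = k := by omega
      have hc : ((k - 1 : Nat) : Int) + 1 = (k : Int) := by exact_mod_cast congrArg (Nat.cast (R := Int)) e1
      have hbs := pvBscan_succ (pvT pattern) (k - 1)
      rw [e1] at hbs
      rw [hbs, hc]
      by_cases he : (pvT pattern).getD (k - 1) [] = (pvT pattern).getD k []
      · simp
      · simp

-- ===== VERDICT (by name: the statement is the Claim_ definition above) =====
theorem patternPointsCols_spec : Claim_equal_patternPointsCols := by
  intro pattern _ hpre
  unfold Spec_patternPointsCols patternPointsCols patternPointsCols_alt
  rw [pvMain pattern _ le_rfl, pvZipCols_eq_pvT pattern hpre]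
  show pvBscan (pvT pattern) ((pattern.headD "").toList.length - 1) =
    pvBscan (pvT pattern) ((pvT pattern).length - 1)
  rw [pvT_length]
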